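-- pv_equiv track=rewrite | github.com/Nacho-Cola/coding-test | 프로그래머스/3/70130. 스타 수열/스타 수열.py | solution
-- ===== SOURCE A (Python) =====
-- from collections import Counter
--
-- def solution(a):
--
--     answer = 0
--     arr = Counter(a)
--     for key in arr:
--         if arr[key] <= answer: # 최대 값보다 작은 값은 스킵
--             continue
--         i = 0
--         temp = 0
--
--         while i < len(a) - 1:
--             if (a[i] != key) and (a[i+1] != key):
--                 i += 1  #가장 많은 수와 같은 숫자가 없음 -> 자리 수 이동
--                 continue
--             if (a[i] == a[i + 1]):
--                 i += 1  #가장 많은 수 한쌍 부분수열 -> 자리 수 이동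
--                 continue
--             # 문제 없으면 2칸 이동
--             temp += 1
--             i += 2
--
--         answer = max(answer,temp)
--
--     return 0 if answer == -1 else answer * 2
-- ===== SOURCE B (Python) =====
-- from collections import Counter
--
-- def solution(a):
--     # Two staged passes per candidate value: (1) run-length encode the
--     # key-ness sequence of a (lengths only), (2) derive the pair count
--     # arithmetically from the run lengths: each run after the first yields
--     # one pair iff the previous run still has an element left to give.
--     best = 0
--     cnt = Counter(a)
--     for key, c in cnt.items():
--         if c <= best:
--             continue
--         # stage 1: lengths of maximal runs of equal key-ness
--         runs = []
--         prev = False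
--         run_len = 0
--         for x in a:
--             k = (x == key)
--             if run_len > 0 and k == prev:
--                 run_len += 1
--             else:
--                 if run_len > 0:
--                     runs.append(run_len)
--                 prev = k
--                 run_len = 1
--         if run_len > 0:
--             runs.append(run_len)
--         # stage 2: pairs from run lengths alone
--         pairs = 0
--         rem = 0
--         for l in runs:
--             if rem > 0:
--                 pairs += 1
--                 rem = l - 1
--             else:
--                 rem = l
--         best = max(best, pairs)
--     return best * 2
-- ===== Notes on version B (the rewrite author's own statement) =====
-- stated objective: alternative
-- what changed: The per-key two-pointer adjacent-pair greedy is replaced by two staged passes: run-length encode the key-ness sequence of a (lengths of maximal equal-key-ness runs), then compute the pair count arithmetically from the run lengths alone (each run after the first yields one pair iff the previous run has an element left); the dead answer==-1 branch is dropped.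
import Mathlib
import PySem

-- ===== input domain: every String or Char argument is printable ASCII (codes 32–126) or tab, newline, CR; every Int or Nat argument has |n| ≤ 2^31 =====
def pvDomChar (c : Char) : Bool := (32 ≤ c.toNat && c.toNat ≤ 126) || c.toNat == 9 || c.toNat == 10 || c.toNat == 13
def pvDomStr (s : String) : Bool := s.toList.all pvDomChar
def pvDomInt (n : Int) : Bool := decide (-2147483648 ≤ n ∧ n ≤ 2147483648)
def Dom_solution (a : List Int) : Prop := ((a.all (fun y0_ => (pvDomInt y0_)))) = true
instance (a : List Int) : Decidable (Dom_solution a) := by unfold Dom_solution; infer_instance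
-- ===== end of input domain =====

-- B replaces the per-key two-pointer adjacent-pair greedy by two staged passes:
-- run-length encode the key-ness sequence, then compute the pair count from the
-- run lengths alone (alternative decomposition; same cost; dead answer==-1 branch dropped).

-- ===== PORT A =====
-- the inner while-loop of A: i scans, pairs advance by 2
def aLoop (key : Int) (a : List Int) (i : Nat) (temp : Int) : Int :=
  if h : i + 1 < a.length then
    if a[i]'(by omega) ≠ key ∧ a[i+1]'h ≠ key then aLoop key a (i+1) temp
    else if a[i]'(by omega) = a[i+1]'h then aLoop key a (i+1) temp
    else aLoop key a (i+2) (temp+1)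
  else temp
termination_by a.length - i

def solution (a : List Int) : Int :=
  let arr := PySem.Dict.counter a
  let answer := arr.keys.foldl
    (fun answer key =>
      if arr.getD key 0 ≤ answer then answer
      else max answer (aLoop key a 0 0)) 0
  if answer = -1 then 0 else answer * 2

-- ===== PORT B =====
-- stage 1 of B: run-length encoding of the key-ness sequence; state = (runs, prev, run_len)
def rleStep (key : Int) (s : List Int × Bool × Int) (x : Int) : List Int × Bool × Int :=
  let k := (x == key)
  if 0 < s.2.2 ∧ k = s.2.1 then (s.1, s.2.1, s.2.2 + 1)
  else ((if 0 < s.2.2 then s.1 ++ [s.2.2] else s.1), k, 1)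

def runsOf (key : Int) (a : List Int) : List Int :=
  let s := a.foldl (rleStep key) ([], false, 0)
  if 0 < s.2.2 then s.1 ++ [s.2.2] else s.1

-- stage 2 of B: pairs from run lengths; state = (pairs, rem)
def pairStep (s : Int × Int) (l : Int) : Int × Int :=
  if 0 < s.2 then (s.1 + 1, l - 1) else (s.1, l)

def altScan (key : Int) (a : List Int) : Int :=
  ((runsOf key a).foldl pairStep (0, 0)).1

def solution_alt (a : List Int) : Int :=
  ((PySem.Dict.counter a).items.foldl
    (fun best kv => if kv.2 ≤ best then best else max best (altScan kv.1 a)) 0) * 2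

-- ===== PRECONDITION & SPEC =====
def Spec_solution (a : List Int) (out : Int) : Prop := out = solution_alt a
instance (a : List Int) (out : Int) : Decidable (Spec_solution a out) := by unfold Spec_solution; infer_instance

-- ===== CLAIM (what is proved, stated in full; the proofs are below) =====
def Claim_equal_solution : Prop := ∀ (a : List Int), Dom_solution a → Spec_solution a (solution a)

-- ===== LEMMAS AND PROOFS =====

-- proof-side intermediate: a single pending-element fold equivalent to A's loop
def pstep (key : Int) (s : Option Int × Int) (x : Int) : Option Int × Int :=
  match s.1 with
  | some p => if (p == key) != (x == key) then (none, s.2 + 1) else (some x, s.2)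
  | none => (some x, s.2)

-- A's loop from index i with pending element a[i] equals the pending fold over the tail
theorem aLoop_eq_foldl_some (key : Int) (a : List Int) :
    ∀ n i temp, a.length - i ≤ n → (h : i < a.length) →
      ((a.drop (i+1)).foldl (pstep key) (some (a[i]'h), temp)).2 = aLoop key a i temp := by
  intro n
  induction n with
  | zero => intro i temp hn h; omega
  | succ n ih =>
    intro i temp hn h
    rw [aLoop]
    by_cases h2 : i + 1 < a.length
    · rw [List.drop_eq_getElem_cons h2, List.foldl_cons, dif_pos h2]
      by_cases hb1 : a[i]'h ≠ key ∧ a[i+1]'h2 ≠ key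
      · rw [if_pos hb1]
        have hs : pstep key (some (a[i]'h), temp) (a[i+1]'h2) = (some (a[i+1]'h2), temp) := by
          simp [pstep, hb1.1, hb1.2]
        rw [hs]
        exact ih (i+1) temp (by omega) h2
      · rw [if_neg hb1]
        by_cases hb2 : a[i]'h = a[i+1]'h2
        · rw [if_pos hb2]
          have hs : pstep key (some (a[i]'h), temp) (a[i+1]'h2) = (some (a[i+1]'h2), temp) := by
            simp [pstep, hb2]
          rw [hs]
          exact ih (i+1) temp (by omega) h2
        · rw [if_neg hb2]
          have hone : (a[i]'h == key) != (a[i+1]'h2 == key) := by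
            rcases not_and_or.mp hb1 with hk | hk <;>
              simp only [not_not] at hk <;> [skip; skip] <;>
              · first
                | (have : a[i+1]'h2 ≠ key := fun he => hb2 (hk.trans he.symm)
                   simp [hk, this])
                | (have : a[i]'h ≠ key := fun he => hb2 (he.trans hk.symm)
                   simp [hk, this])
          have hs : pstep key (some (a[i]'h), temp) (a[i+1]'h2) = (none, temp + 1) := by
            simp [pstep, hone]
          rw [hs]
          by_cases h3 : i + 2 < a.length
          · rw [show i + 1 + 1 = i + 2 from rfl, List.drop_eq_getElem_cons h3, List.foldl_cons]
            have hs2 : pstep key (none, temp + 1) (a[i+2]'h3) = (some (a[i+2]'h3), temp + 1) := by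
              simp [pstep]
            rw [hs2]
            exact ih (i+2) (temp+1) (by omega) h3
          · rw [List.drop_eq_nil_of_le (by omega), List.foldl_nil]
            rw [aLoop, dif_neg (by omega)]
    · rw [dif_neg h2, List.drop_eq_nil_of_le (by omega), List.foldl_nil]

-- the pending fold equals the staged RLE + run-length pairing, by a fused invariant:
-- the open run (prev, len) together with closed runs determines the pending state
theorem pfold_eq_runs (key : Int) :
    ∀ (xs runs : List Int) (prev : Bool) (len : Int) (p : Int),
      1 ≤ len → (p == key) = prev →
      (xs.foldl (pstep key)
        ((if 0 < ((runs ++ [len]).foldl pairStep (0,0)).2 then some p else none),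
          ((runs ++ [len]).foldl pairStep (0,0)).1)).2
      = ((let s := xs.foldl (rleStep key) (runs, prev, len)
          if 0 < s.2.2 then s.1 ++ [s.2.2] else s.1).foldl pairStep (0,0)).1 := by
  intro xs
  induction xs with
  | nil =>
    intro runs prev len p hlen hp
    simp only [List.foldl_nil]
    rw [if_pos (show (0:Int) < len by omega)]
  | cons x xs ih =>
    intro runs prev len p hlen hp
    simp only [List.foldl_cons]
    set q := (runs ++ [len]).foldl pairStep (0,0) with hq
    have hqlen : q = pairStep (runs.foldl pairStep (0,0)) len := by
      rw [hq, List.foldl_append, List.foldl_cons, List.foldl_nil]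
    by_cases hk : (x == key) = prev
    · -- same run continues
      have hr : rleStep key (runs, prev, len) x = (runs, prev, len + 1) := by
        simp [rleStep, hk, show (0:Int) < len by omega]
      rw [hr]
      have h1 : 1 ≤ len + 1 := by omega
      have := ih runs prev (len + 1) x h1 hk
      set q' := (runs ++ [len + 1]).foldl pairStep (0,0) with hq'
      have hq'len : q' = pairStep (runs.foldl pairStep (0,0)) (len + 1) := by
        rw [hq', List.foldl_append, List.foldl_cons, List.foldl_nil]
      have hqq : q'.1 = q.1 ∧ 0 < q'.2 := by
        rw [hqlen, hq'len]
        by_cases h0 : 0 < (runs.foldl pairStep (0,0)).2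
        · simp only [pairStep, if_pos h0]
          refine ⟨by simp, by omega⟩
        · simp only [pairStep, if_neg h0]
          refine ⟨by simp, by omega⟩
      -- pstep on the start state gives (some x, q.1) in both pending cases
      have hps : pstep key
          ((if 0 < q.2 then some p else none), q.1) x = (some x, q.1) := by
        by_cases h0 : 0 < q.2
        · rw [if_pos h0]; simp [pstep, hp, hk]
        · rw [if_neg h0]; simp [pstep]
      rw [hps]
      rw [if_pos hqq.2, hqq.1] at this
      simpa using this
    · -- run boundary: close (prev, len), open (x==key, 1)
      have hr : rleStep key (runs, prev, len) x =
          (runs ++ [len], (x == key), 1) := by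
        simp only [rleStep]
        rw [if_neg (by simp [hk]), if_pos (show (0:Int) < len by omega)]
      rw [hr]
      have := ih (runs ++ [len]) (x == key) 1 x le_rfl rfl
      set q' := ((runs ++ [len]) ++ [(1:Int)]).foldl pairStep (0,0) with hq'
      have hq'q : q' = pairStep q 1 := by
        rw [hq', List.foldl_append, ← hq, List.foldl_cons, List.foldl_nil]
      by_cases h0 : 0 < q.2
      · -- a pair forms
        have hps : pstep key ((if 0 < q.2 then some p else none), q.1) x
            = (none, q.1 + 1) := by
          rw [if_pos h0]; simp [pstep, hp, Ne.symm hk]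
        have hq'v : q' = (q.1 + 1, 0) := by rw [hq'q]; simp [pairStep, h0]
        rw [hps]
        rw [hq'v] at this
        simpa using this
      · have hps : pstep key ((if 0 < q.2 then some p else none), q.1) x
            = (some x, q.1) := by
          rw [if_neg h0]; simp [pstep]
        have hq'v : q' = (q.1, 1) := by rw [hq'q]; simp [pairStep, h0]
        rw [hps]
        rw [hq'v] at this
        simpa using this

-- B's staged scan equals A's inner loop
theorem altScan_eq_aLoop (key : Int) (a : List Int) :
    altScan key a = aLoop key a 0 0 := by
  cases a with
  | nil => simp [altScan, runsOf, aLoop]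
  | cons x xs =>
    have hA : ((x :: xs).foldl (pstep key) (none, 0)).2 = aLoop key (x :: xs) 0 0 := by
      rw [List.foldl_cons]
      have hs : pstep key (none, (0:Int)) x = (some x, 0) := by simp [pstep]
      rw [hs]
      have h0 : 0 < (x :: xs).length := by simp
      have := aLoop_eq_foldl_some key (x :: xs) (x :: xs).length 0 0 (by omega) h0
      simpa using this
    have hr : rleStep key ([], false, 0) x = ([], (x == key), 1) := by
      simp [rleStep]
    have hB := pfold_eq_runs key xs [] (x == key) 1 x le_rfl rfl
    have hq : (([] ++ [(1:Int)]).foldl pairStep (0,0)) = (0, 1) := by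
      simp [pairStep]
    rw [hq] at hB
    rw [show ((0:Int),(1:Int)).2 = (1:Int) from rfl,
      show ((0:Int),(1:Int)).1 = (0:Int) from rfl] at hB
    rw [if_pos (by omega : (0:Int) < 1)] at hB
    unfold altScan runsOf
    rw [List.foldl_cons, hr]
    rw [← hB]
    rw [← hA, List.foldl_cons, show pstep key (none, (0:Int)) x = (some x, 0) by simp [pstep]]

-- the outer fold's accumulator never decreases, so answer ≥ 0 (dead -1 branch)
theorem foldl_prune_ge (f g : Int → Int) (l : List Int) :
    ∀ ans : Int, ans ≤ l.foldl (fun b k => if g k ≤ b then b else max b (f k)) ans := by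
  induction l with
  | nil => intro ans; simp
  | cons x l ih =>
    intro ans
    rw [List.foldl_cons]
    refine le_trans ?_ (ih _)
    split_ifs
    · exact le_refl _
    · exact le_max_left _ _

-- ===== VERDICT (by name: the statement is the Claim_ definition above) =====
theorem solution_spec : Claim_equal_solution := by
  intro a _
  unfold Spec_solution solution solution_alt
  simp only [PySem.Dict.items_counter, List.foldl_map, PySem.Dict.keys_counter,
    PySem.Dict.getD_counter, altScan_eq_aLoop]
  have hge := foldl_prune_ge (fun k => aLoop k a 0 0) (fun k => ((a.count k : Int)))
    (PySem.Set.ofList a) 0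
  rw [if_neg (by omega)]
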